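-- pv_equiv track=rewrite | github.com/Venexs/The-System | Anime Version/Demon Castle/gui.py | get_priority_key_and_value
-- ===== SOURCE A (Python) =====
-- def get_priority_key_and_value(contents):
--     """
--     Returns the key and value of the first "Doing" item in the dictionary.
--     If no "Doing" is found, returns the key and value of the first "Undone".
--     If neither is found, returns (None, None).
--     """
--     for key, value in contents.items():
--         if value == "Doing":
--             return key, value
--     for key, value in contents.items():
--         if value == "Undone":
--             return key, value
--     return None, None
-- ===== SOURCE B (Python) =====
-- def get_priority_key_and_value(contents):
--     first_undone = None
--     for key, value in contents.items():
--         if value == "Doing":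
--             return key, value
--         if value == "Undone" and first_undone is None:
--             first_undone = (key, value)
--     return first_undone if first_undone is not None else (None, None)
-- ===== Notes on version B (the rewrite author's own statement) =====
-- stated objective: simpler
-- what changed: A's two sequential scans over contents.items() are replaced by a single pass that returns on the first 'Doing' and remembers the first 'Undone' in an accumulator.
import Mathlib
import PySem

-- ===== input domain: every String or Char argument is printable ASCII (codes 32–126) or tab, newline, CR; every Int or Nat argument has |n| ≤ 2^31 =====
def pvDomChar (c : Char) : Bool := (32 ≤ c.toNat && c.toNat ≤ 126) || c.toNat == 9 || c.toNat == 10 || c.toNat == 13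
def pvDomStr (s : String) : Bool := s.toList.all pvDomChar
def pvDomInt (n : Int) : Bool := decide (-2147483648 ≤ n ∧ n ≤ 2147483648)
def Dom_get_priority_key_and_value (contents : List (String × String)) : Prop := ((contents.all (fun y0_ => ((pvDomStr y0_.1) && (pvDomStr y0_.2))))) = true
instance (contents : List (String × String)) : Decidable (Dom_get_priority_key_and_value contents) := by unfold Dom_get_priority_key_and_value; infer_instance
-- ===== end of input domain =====

-- B does the same job in ONE pass (return first "Doing" immediately, remember the first "Undone"), instead of A's two scans; return values proved equal.

-- ===== PORT A =====
-- A's two 'for key, value in contents.items(): if value == t: return key, value' loops, as one helper used twice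
def pvScanFor (t : String) : List (String × String) → Option (String × String)
  | [] => none
  | (k, v) :: rest => if v == t then some (k, v) else pvScanFor t rest

def get_priority_key_and_value (contents : List (String × String)) : Option String × Option String :=
  let items := (PySem.Dict.ofList contents).items
  match pvScanFor "Doing" items with
  | some (k, v) => (some k, some v)
  | none =>
    match pvScanFor "Undone" items with
    | some (k, v) => (some k, some v)
    | none => (none, none)

-- ===== PORT B =====
-- B's single loop; acc is the 'first_undone' variable
def pvOnePass (acc : Option (String × String)) : List (String × String) → Option String × Option String
  | [] => match acc with
          | some (k, v) => (some k, some v)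
          | none => (none, none)
  | (k, v) :: rest =>
    if v == "Doing" then (some k, some v)
    else pvOnePass (if v == "Undone" && acc.isNone then some (k, v) else acc) rest

def get_priority_key_and_value_alt (contents : List (String × String)) : Option String × Option String :=
  pvOnePass none (PySem.Dict.ofList contents).items

-- ===== PRECONDITION & SPEC =====
def Spec_get_priority_key_and_value (contents : List (String × String)) (out : Option String × Option String) : Prop := out = get_priority_key_and_value_alt contents
instance (contents : List (String × String)) (out : Option String × Option String) : Decidable (Spec_get_priority_key_and_value contents out) := by unfold Spec_get_priority_key_and_value; infer_instance

-- ===== CLAIM (what is proved, stated in full; the proofs are below) =====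
def Claim_equal_get_priority_key_and_value : Prop := ∀ (contents : List (String × String)), Dom_get_priority_key_and_value contents → Spec_get_priority_key_and_value contents (get_priority_key_and_value contents)

-- ===== LEMMAS AND PROOFS =====
theorem pvOnePass_eq (items : List (String × String)) : ∀ (acc : Option (String × String)),
    pvOnePass acc items =
      match pvScanFor "Doing" items with
      | some (k, v) => (some k, some v)
      | none =>
        match acc with
        | some (k, v) => (some k, some v)
        | none =>
          match pvScanFor "Undone" items with
          | some (k, v) => (some k, some v)
          | none => (none, none) := by
  induction items with
  | nil => intro acc; simp [pvOnePass, pvScanFor]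
  | cons hd tl ih =>
    intro acc
    obtain ⟨k, v⟩ := hd
    by_cases hD : v = "Doing"
    · simp [pvOnePass, pvScanFor, hD]
    · by_cases hU : v = "Undone"
      · cases acc with
        | none => simp [pvOnePass, pvScanFor, hD, hU, ih]
        | some p => simp [pvOnePass, pvScanFor, hD, hU, ih]
      · simp [pvOnePass, pvScanFor, hD, hU, ih]

-- ===== VERDICT (by name: the statement is the Claim_ definition above) =====
theorem get_priority_key_and_value_spec : Claim_equal_get_priority_key_and_value := by
  intro contents _
  unfold Spec_get_priority_key_and_value get_priority_key_and_value get_priority_key_and_value_alt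
  rw [pvOnePass_eq]
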